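-- pv_equiv track=rewrite | github.com/ksattari/Coursera-git-github | binaryArrayTree.py | solution
-- ===== SOURCE A (Python) =====
-- def solution(arr):
--     # Type your solution here
--     lsp = 1 #level start position
--     left = right = 0
--     x = 1 #level
--
--     while lsp < len(arr):
--       half = 2**x // 2 #halfway point based on tree level
--       mid = lsp+half if lsp+half < len(arr) else len(arr)
--       end = lsp + 2*half if lsp + 2*half < len(arr) else len(arr)
--       for i in range(lsp,mid):
--         left  = left if arr[i] == -1 else left + arr[i]
--       for i in range(mid,end):
--         right  = right if arr[i] == -1 else right + arr[i]
--       lsp = lsp + 2**x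
--       x += 1
--
--     if len(arr) <= 1 or left == right:
--       return ""
--     elif left > right:
--       return "Left"
--     return "Right"
-- ===== SOURCE B (Python) =====
-- def solution(arr):
--     left = right = 0
--     for i in range(1, len(arr)):
--         v = arr[i]
--         if v == -1:
--             continue
--         L = (i + 1).bit_length() - 1      # tree level of index i (root = level 0)
--         if i - (2 ** L - 1) < 2 ** (L - 1):
--             left += v
--         else:
--             right += v
--     if len(arr) <= 1 or left == right:
--         return ""
--     if left > right:
--         return "Left"
--     return "Right"
-- ===== Notes on version B (the rewrite author's own statement) =====
-- stated objective: alternative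
-- what changed: Replaces the nested level-by-level while loop (computing per-level start/mid/end boundaries and two inner range loops) with a single flat pass over indices 1..n-1 that classifies each index as left or right subtree via bit-length level arithmetic.
import Mathlib
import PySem

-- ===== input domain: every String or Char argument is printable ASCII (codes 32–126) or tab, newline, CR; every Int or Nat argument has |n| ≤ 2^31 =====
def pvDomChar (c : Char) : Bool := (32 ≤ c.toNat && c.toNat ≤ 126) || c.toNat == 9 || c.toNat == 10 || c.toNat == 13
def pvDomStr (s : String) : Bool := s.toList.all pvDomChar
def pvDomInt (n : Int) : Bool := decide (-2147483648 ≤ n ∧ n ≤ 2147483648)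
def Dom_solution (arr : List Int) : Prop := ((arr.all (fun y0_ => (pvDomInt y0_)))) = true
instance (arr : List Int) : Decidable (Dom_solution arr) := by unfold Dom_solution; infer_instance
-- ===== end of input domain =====

-- B replaces A's nested level-by-level while loop with one flat pass classifying each
-- index by bit-length level arithmetic (objective: alternative decomposition, same cost).

-- ===== PORT A =====
-- inner-loop body: `left = left if arr[i] == -1 else left + arr[i]`
-- (index i is always < arr.length here, so getD is exact for Python's arr[i])
def aStep (arr : List Int) (acc : Int) (i : Nat) : Int :=
  if arr.getD i 0 = -1 then acc else acc + arr.getD i 0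

-- the `while lsp < len(arr)` loop, carrying (lsp, x, left, right)
def aLoop (arr : List Int) (lsp x : Nat) (left right : Int) : Int × Int :=
  if h : lsp < arr.length then
    let half := 2 ^ x / 2
    let mid := if lsp + half < arr.length then lsp + half else arr.length
    let en := if lsp + 2 * half < arr.length then lsp + 2 * half else arr.length
    let left' := (List.range' lsp (mid - lsp)).foldl (aStep arr) left
    let right' := (List.range' mid (en - mid)).foldl (aStep arr) right
    aLoop arr (lsp + 2 ^ x) (x + 1) left' right'
  else (left, right)
termination_by arr.length - lsp
decreasing_by
  have : 1 ≤ 2 ^ x := Nat.one_le_two_pow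
  omega

def solution (arr : List Int) : String :=
  let p := aLoop arr 1 1 0 0
  if arr.length ≤ 1 ∨ p.1 = p.2 then ""
  else if p.1 > p.2 then "Left"
  else "Right"

-- ===== PORT B =====
-- one flat step: skip -1, else classify index i as left/right by its tree level
-- ((i+1).bit_length() - 1 = Nat.log2 (i+1) for i ≥ 1)
def bStep (arr : List Int) (p : Int × Int) (i : Nat) : Int × Int :=
  let v := arr.getD i 0
  if v = -1 then p
  else
    let L := Nat.log2 (i + 1)
    if i - (2 ^ L - 1) < 2 ^ (L - 1) then (p.1 + v, p.2) else (p.1, p.2 + v)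

def solution_alt (arr : List Int) : String :=
  let p := (List.range' 1 (arr.length - 1)).foldl (bStep arr) (0, 0)
  if arr.length ≤ 1 ∨ p.1 = p.2 then ""
  else if p.1 > p.2 then "Left"
  else "Right"

-- ===== PRECONDITION & SPEC =====
def Spec_solution (arr : List Int) (out : String) : Prop := out = solution_alt arr
instance (arr : List Int) (out : String) : Decidable (Spec_solution arr out) := by unfold Spec_solution; infer_instance

-- ===== CLAIM (what is proved, stated in full; the proofs are below) =====
def Claim_equal_solution : Prop := ∀ (arr : List Int), Dom_solution arr → Spec_solution arr (solution arr)

-- ===== LEMMAS AND PROOFS =====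

theorem log2_eq_of (x m : Nat) (h1 : 2 ^ x ≤ m) (h2 : m < 2 ^ (x + 1)) :
    Nat.log2 m = x := by
  rw [Nat.log2_eq_log_two]
  exact Nat.log_eq_of_pow_le_of_lt_pow h1 h2

-- a fold of bStep over indices that all classify LEFT only touches the first component
theorem foldl_bStep_left (arr : List Int) (xs : List Nat)
    (h : ∀ i ∈ xs, i - (2 ^ Nat.log2 (i + 1) - 1) < 2 ^ (Nat.log2 (i + 1) - 1)) :
    ∀ l r : Int, xs.foldl (bStep arr) (l, r) = (xs.foldl (aStep arr) l, r) := by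
  induction xs with
  | nil => intro l r; rfl
  | cons i xs ih =>
    intro l r
    have hi := h i (by simp)
    simp only [List.foldl_cons, bStep, aStep]
    split_ifs with hv
    · exact ih (fun j hj => h j (List.mem_cons_of_mem _ hj)) l r
    · exact ih (fun j hj => h j (List.mem_cons_of_mem _ hj)) (l + arr.getD i 0) r

-- a fold of bStep over indices that all classify RIGHT only touches the second component
theorem foldl_bStep_right (arr : List Int) (xs : List Nat)
    (h : ∀ i ∈ xs, ¬ (i - (2 ^ Nat.log2 (i + 1) - 1) < 2 ^ (Nat.log2 (i + 1) - 1))) :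
    ∀ l r : Int, xs.foldl (bStep arr) (l, r) = (l, xs.foldl (aStep arr) r) := by
  induction xs with
  | nil => intro l r; rfl
  | cons i xs ih =>
    intro l r
    have hi := h i (by simp)
    simp only [List.foldl_cons, bStep, aStep]
    split_ifs with hv
    · exact ih (fun j hj => h j (List.mem_cons_of_mem _ hj)) l r
    · exact ih (fun j hj => h j (List.mem_cons_of_mem _ hj)) l (r + arr.getD i 0)

-- main invariant: A's while loop, entered at level x (so lsp = 2^x - 1), computes
-- exactly B's flat fold over the remaining indices
theorem aLoop_eq_foldl (arr : List Int) :
    ∀ (fuel x : Nat) (left right : Int), 1 ≤ x →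
      arr.length - (2 ^ x - 1) ≤ fuel →
      aLoop arr (2 ^ x - 1) x left right =
        (List.range' (2 ^ x - 1) (arr.length - (2 ^ x - 1))).foldl (bStep arr) (left, right) := by
  intro fuel
  induction fuel with
  | zero =>
    intro x left right hx hf
    have hge : arr.length ≤ 2 ^ x - 1 := by omega
    rw [aLoop]
    simp [Nat.not_lt.mpr hge, Nat.sub_eq_zero_of_le hge]
  | succ fuel ih =>
    intro x left right hx hf
    by_cases hlt : 2 ^ x - 1 < arr.length
    · rw [aLoop]
      simp only [dif_pos hlt]
      set n := arr.length with hn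
      set lsp := 2 ^ x - 1 with hlsp
      have hpow : 2 ^ x = 2 ^ (x - 1) + 2 ^ (x - 1) := by
        have : 2 ^ ((x - 1) + 1) = 2 ^ (x - 1) * 2 := pow_succ 2 (x - 1)
        have hx1 : (x - 1) + 1 = x := by omega
        rw [hx1] at this; omega
      have hhalf : 2 ^ x / 2 = 2 ^ (x - 1) := by omega
      have hpow1 : 1 ≤ 2 ^ (x - 1) := Nat.one_le_two_pow
      have hnext : lsp + 2 ^ x = 2 ^ (x + 1) - 1 := by
        have : 2 ^ (x + 1) = 2 ^ x * 2 := pow_succ 2 x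
        have h1 : 1 ≤ 2 ^ x := Nat.one_le_two_pow
        omega
      rw [hhalf]
      set mid := if lsp + 2 ^ (x - 1) < n then lsp + 2 ^ (x - 1) else n with hmid
      set en := if lsp + 2 * 2 ^ (x - 1) < n then lsp + 2 * 2 ^ (x - 1) else n with hen
      have hmid_le : lsp ≤ mid ∧ mid ≤ n ∧ mid ≤ lsp + 2 ^ (x - 1) := by
        rw [hmid]; split_ifs <;> omega
      have hen_le : mid ≤ en ∧ en ≤ n ∧ en ≤ lsp + 2 ^ x := by
        rw [hen, hmid]; split_ifs <;> omega
      -- classification facts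
      have hlogL : ∀ i ∈ List.range' lsp (mid - lsp),
          i - (2 ^ Nat.log2 (i + 1) - 1) < 2 ^ (Nat.log2 (i + 1) - 1) := by
        intro i hi
        rw [List.mem_range'_1] at hi
        have hlog : Nat.log2 (i + 1) = x := by
          apply log2_eq_of
          · omega
          · have : 2 ^ (x + 1) = 2 ^ x * 2 := pow_succ 2 x
            omega
        rw [hlog]; omega
      have hlogR : ∀ i ∈ List.range' mid (en - mid),
          ¬ (i - (2 ^ Nat.log2 (i + 1) - 1) < 2 ^ (Nat.log2 (i + 1) - 1)) := by
        intro i hi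
        rw [List.mem_range'_1] at hi
        -- nonempty right range forces mid = lsp + 2^(x-1)
        have hmid_eq : mid = lsp + 2 ^ (x - 1) := by
          by_contra hne
          have : mid = n := by rw [hmid] at hne ⊢; split_ifs at hne ⊢ <;> omega
          omega
        have hlog : Nat.log2 (i + 1) = x := by
          apply log2_eq_of
          · omega
          · have : 2 ^ (x + 1) = 2 ^ x * 2 := pow_succ 2 x
            omega
        rw [hlog]; omega
      -- split B's range into this level's left half, right half, and the rest
      have hsplit1 : List.range' lsp (n - lsp) =
          List.range' lsp (mid - lsp) ++ List.range' mid (en - mid) ++ List.range' en (n - en) := by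
        rw [show n - lsp = (mid - lsp) + ((en - mid) + (n - en)) by omega,
            ← List.range'_append_1, ← List.range'_append_1,
            show lsp + (mid - lsp) = mid by omega,
            show mid + (en - mid) = en by omega, List.append_assoc]
      rw [hsplit1, List.foldl_append, List.foldl_append]
      rw [foldl_bStep_left arr _ hlogL, foldl_bStep_right arr _ hlogR]
      -- recursive call = fold over the rest
      have hrec := ih (x + 1) ((List.range' lsp (mid - lsp)).foldl (aStep arr) left)
          ((List.range' mid (en - mid)).foldl (aStep arr) right) (by omega)
          (by
            have h1 : 1 ≤ 2 ^ x := Nat.one_le_two_pow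
            omega)
      rw [← hnext] at hrec
      rw [hrec]
      -- range' en (n - en) = range' (lsp + 2^x) (n - (lsp + 2^x)) (both empty if en = n = lsp+2^x cutoff)
      by_cases hcut : lsp + 2 * 2 ^ (x - 1) < n
      · have : en = lsp + 2 ^ x := by rw [hen]; simp [hcut]; omega
        rw [this]
      · have he : en = n := by rw [hen]; simp [hcut]
        have hz : n - en = 0 := by omega
        have hz2 : n - (lsp + 2 ^ x) = 0 := by omega
        rw [hz, hz2]; rfl
    · rw [aLoop]
      have hz : arr.length - (2 ^ x - 1) = 0 := by omega
      simp [hlt, hz]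

theorem solution_eq (arr : List Int) : solution arr = solution_alt arr := by
  unfold solution solution_alt
  have h := aLoop_eq_foldl arr arr.length 1 0 0 (le_refl 1) (by omega)
  norm_num at h
  rw [h]

-- ===== VERDICT (by name: the statement is the Claim_ definition above) =====
theorem solution_spec : Claim_equal_solution := by
  intro arr _
  unfold Spec_solution
  exact solution_eq arr
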